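-- pv_equiv track=rewrite | github.com/metril/akashic | api/akashic/services/scan_runner.py | _redact_for_log
-- ===== SOURCE A (Python) =====
-- def _redact_for_log(argv: list[str]) -> list[str]:
--     """Replace the value following any `-pass` / `-key-passphrase` flag
--     with '<redacted>' so the api log line doesn't leak credentials."""
--     out: list[str] = []
--     redact_next = False
--     for token in argv:
--         if redact_next:
--             out.append("<redacted>")
--             redact_next = False
--         else:
--             out.append(token)
--             if token in ("-pass", "-key-passphrase"):
--                 redact_next = True
--     return out
-- ===== SOURCE B (Python) =====
-- def _redact_for_log(argv: list[str]) -> list[str]: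
--     """Replace the value following any `-pass` / `-key-passphrase` flag
--     with '<redacted>' so the api log line doesn't leak credentials."""
--     out: list[str] = []
--     i = 0
--     n = len(argv)
--     while i < n:
--         tok = argv[i]
--         out.append(tok)
--         i += 1
--         if tok in ("-pass", "-key-passphrase") and i < n:
--             out.append("<redacted>")
--             i += 1
--     return out
-- ===== Notes on version B (the rewrite author's own statement) =====
-- stated objective: simpler
-- what changed: Replaces the carried boolean redact_next state with an index-cursor loop that consumes the flag and its value token in one step, so no cross-iteration flag state exists.
import Mathlib
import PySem

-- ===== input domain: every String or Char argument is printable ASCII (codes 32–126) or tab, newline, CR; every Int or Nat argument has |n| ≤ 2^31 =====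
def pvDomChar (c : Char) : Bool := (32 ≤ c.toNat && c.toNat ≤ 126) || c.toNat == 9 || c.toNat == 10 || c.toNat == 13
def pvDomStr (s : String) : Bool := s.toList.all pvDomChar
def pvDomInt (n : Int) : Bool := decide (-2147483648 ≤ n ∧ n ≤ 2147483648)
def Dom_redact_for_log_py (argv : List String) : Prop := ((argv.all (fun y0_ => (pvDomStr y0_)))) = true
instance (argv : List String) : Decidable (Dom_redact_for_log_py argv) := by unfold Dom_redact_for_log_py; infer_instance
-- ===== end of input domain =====

-- B replaces A's carried redact_next boolean with a cursor loop consuming flag and value together (simpler); return value only, no mutation.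

-- ===== PORT A =====
-- A's for-loop over argv with state (out, redact_next), transliterated as structural recursion over the same state.
def redactForLogLoop (out : List String) (redact_next : Bool) : List String → List String
  | [] => out
  | token :: rest =>
    if redact_next then
      redactForLogLoop (out ++ ["<redacted>"]) false rest
    else
      redactForLogLoop (out ++ [token])
        (token == "-pass" || token == "-key-passphrase") rest

def redact_for_log_py (argv : List String) : List String :=
  redactForLogLoop [] false argv

-- ===== PORT B =====
-- B's while-cursor loop: consume the flag together with its value token (if in range).
def redactForLogCursor : List String → List String
  | [] => []
  | tok :: rest =>
    if tok == "-pass" || tok == "-key-passphrase" then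
      match rest with
      | [] => [tok]
      | _ :: rest' => tok :: "<redacted>" :: redactForLogCursor rest'
    else
      tok :: redactForLogCursor rest

def redact_for_log_py_alt (argv : List String) : List String :=
  redactForLogCursor argv

-- ===== PRECONDITION & SPEC =====
def Spec_redact_for_log_py (argv : List String) (out : List String) : Prop := out = redact_for_log_py_alt argv
instance (argv : List String) (out : List String) : Decidable (Spec_redact_for_log_py argv out) := by unfold Spec_redact_for_log_py; infer_instance

-- ===== CLAIM (what is proved, stated in full; the proofs are below) =====
def Claim_equal_redact_for_log_py : Prop := ∀ (argv : List String), Dom_redact_for_log_py argv → Spec_redact_for_log_py argv (redact_for_log_py argv)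

-- ===== LEMMAS AND PROOFS =====

-- Loop invariant: from the "no pending redaction" state, A's loop appends exactly B's cursor output.
theorem redactForLogLoop_false (l : List String) :
    ∀ out, redactForLogLoop out false l = out ++ redactForLogCursor l := by
  induction l using redactForLogCursor.induct with
  | case1 =>
      intro out; simp [redactForLogLoop, redactForLogCursor]
  | case2 tok h =>
      intro out
      simp [redactForLogLoop, redactForLogCursor, h]
  | case3 tok h v rest' ih =>
      intro out
      simp only [redactForLogLoop, redactForLogCursor, h, if_pos, ih]
      simp
  | case4 tok rest h ih =>
      intro out
      have hb : (tok == "-pass" || tok == "-key-passphrase") = false :=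
        Bool.eq_false_iff.mpr h
      rw [redactForLogLoop, if_neg (by simp), hb, ih]
      simp only [Bool.or_eq_true, beq_iff_eq, not_or] at h
      conv_rhs => rw [redactForLogCursor.eq_def]
      simp [hb]

-- ===== VERDICT (by name: the statement is the Claim_ definition above) =====
theorem redact_for_log_py_spec : Claim_equal_redact_for_log_py := by
  intro argv _
  unfold Spec_redact_for_log_py redact_for_log_py redact_for_log_py_alt
  simpa using redactForLogLoop_false argv []
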